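-- pv_equiv track=rewrite | github.com/prd-hieu-nguyen-minh/olivia_flutter_module | po2arb.py | add_number_param
-- ===== SOURCE A (Python) =====
-- def add_number_param(value):
--     new = ""
--     split = value.split("{param}")
--     size = len(split)
--     if size > 1:
--         for idx, text in enumerate(split):
--             if idx == size - 1:
--                 new += text
--             else:
--                 new += text + "{param" + str(idx + 1) + "}"
--     else:
--         new = value
--     return new
-- ===== SOURCE B (Python) =====
-- import re
--
-- def add_number_param(value):
--     count = 0
--     def repl(_m):
--         nonlocal count
--         count += 1
--         return "{param" + str(count) + "}"
--     return re.sub(re.escape("{param}"), repl, value)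
-- ===== Notes on version B (the rewrite author's own statement) =====
-- stated objective: idiomatic
-- what changed: B numbers the placeholders with a single re.sub over the escaped literal pattern and a counting closure, instead of splitting on the literal and rebuilding the string piece by piece with an indexed loop.
import Mathlib
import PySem

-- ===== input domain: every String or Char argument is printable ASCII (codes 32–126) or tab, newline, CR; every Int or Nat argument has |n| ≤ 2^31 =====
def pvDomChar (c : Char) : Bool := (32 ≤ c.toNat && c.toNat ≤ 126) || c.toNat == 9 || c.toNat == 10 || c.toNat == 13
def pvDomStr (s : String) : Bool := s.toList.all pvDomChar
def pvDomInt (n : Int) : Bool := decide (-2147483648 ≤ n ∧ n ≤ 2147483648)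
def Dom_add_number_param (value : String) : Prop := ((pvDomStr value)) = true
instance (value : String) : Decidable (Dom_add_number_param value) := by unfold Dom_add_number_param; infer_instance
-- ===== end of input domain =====

-- B replaces each "{param}" occurrence with its numbered form in one left-to-right scan
-- (in Python via re.sub with a counting closure) instead of splitting and rejoining; objective: idiomatic.

-- ===== PORT A =====
-- value.split("{param}"): split? is always `some` here since the separator is a nonempty literal.
def add_number_param (value : String) : String :=
  let split := (PySem.Str.split? value "{param}").getD []
  let size : Int := split.length
  if size > 1 then
    (PySem.List.enumerate split).foldl
      (fun new p =>
        if p.1 == size - 1 then new ++ p.2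
        else new ++ p.2 ++ "{param" ++ PySem.Int.toStr (p.1 + 1) ++ "}") ""
  else value

-- ===== PORT B =====
-- Source B uses re.sub(re.escape("{param}"), repl, value) with a counting closure; the regex
-- engine's replacement of a LITERAL pattern is ported by hand, exactly, as a left-to-right
-- scan that rewrites each occurrence as it is found and increments the counter.
def pvSep : List Char := ['{', 'p', 'a', 'r', 'a', 'm', '}']

def pvTag (n : Int) : List Char := "{param".toList ++ (PySem.Int.toStr n).toList ++ ['}']

def pvScan (n : Int) : List Char → List Char
  | [] => []
  | c :: rest =>
    if pvSep.isPrefixOf (c :: rest) then pvTag n ++ pvScan (n + 1) (List.drop 6 rest)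
    else c :: pvScan n rest
termination_by l => l.length
decreasing_by all_goals simp

def add_number_param_alt (value : String) : String :=
  String.ofList (pvScan 1 value.toList)

-- ===== PRECONDITION & SPEC =====
def Spec_add_number_param (value : String) (out : String) : Prop := out = add_number_param_alt value
instance (value : String) (out : String) : Decidable (Spec_add_number_param value out) := by unfold Spec_add_number_param; infer_instance

-- ===== CLAIM (what is proved, stated in full; the proofs are below) =====
def Claim_equal_add_number_param : Prop := ∀ (value : String), Dom_add_number_param value → Spec_add_number_param value (add_number_param value)

-- ===== LEMMAS AND PROOFS =====

-- A simple structural characterisation of PySem.Chars.splitOn on our separator.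
def mySplit : List Char → List (List Char)
  | [] => [[]]
  | c :: rest =>
    if pvSep.isPrefixOf (c :: rest) then [] :: mySplit (List.drop 6 rest)
    else (mySplit rest).modifyHead (c :: ·)
termination_by l => l.length
decreasing_by all_goals simp

-- The numbered rejoin of the split pieces, starting at n.
def numberJoin (n : Int) : List (List Char) → List Char
  | [] => []
  | [x] => x
  | x :: y :: t => x ++ pvTag n ++ numberJoin (n + 1) (y :: t)

theorem mySplit_ne_nil (l : List Char) : mySplit l ≠ [] := by
  induction l using mySplit.induct with
  | case1 => simp [mySplit]
  | case2 c rest h ih => rw [mySplit]; simp [h]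
  | case3 c rest h ih =>
    rw [mySplit]; simp [h]
    cases hm : mySplit rest with
    | nil => exact absurd hm ih
    | cons a t => simp

theorem go_spec (fuel : Nat) : ∀ (l cur : List Char) (accl : List (List Char)),
    l.length < fuel →
    PySem.Chars.splitOn.go pvSep fuel l cur accl =
      accl.reverse ++ (mySplit l).modifyHead (cur.reverse ++ ·) := by
  induction fuel with
  | zero => intro l cur accl h; omega
  | succ fuel ih =>
    intro l cur accl h
    cases l with
    | nil =>
      rw [PySem.Chars.splitOn.go, mySplit]
      simp [List.modifyHead]
      omega
    | cons c rest =>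
      rw [PySem.Chars.splitOn.go, mySplit]
      by_cases hp : pvSep.isPrefixOf (c :: rest) = true
      · simp only [hp, if_pos]
        have hd : List.drop pvSep.length (c :: rest) = List.drop 6 rest := by
          simp [pvSep]
        rw [hd, ih _ _ _ (by simp only [List.length_drop, List.length_cons] at h ⊢; omega)]
        cases hm : mySplit (List.drop 6 rest) with
        | nil => exact absurd hm (mySplit_ne_nil _)
        | cons a t => simp [List.modifyHead]
      · rw [if_neg hp, if_neg hp]
        rw [ih _ _ _ (by simp at h ⊢; omega)]
        cases hm : mySplit rest with
        | nil => exact absurd hm (mySplit_ne_nil _)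
        | cons a t => simp [List.modifyHead]

theorem splitOn_eq_mySplit (l : List Char) :
    PySem.Chars.splitOn l pvSep = mySplit l := by
  rw [PySem.Chars.splitOn, go_spec (l.length + 1) l [] [] (by omega)]
  cases hm : mySplit l with
  | nil => exact absurd hm (mySplit_ne_nil _)
  | cons a t => simp [List.modifyHead]

theorem mySplit_singleton (l : List Char) : (mySplit l).length = 1 → mySplit l = [l] := by
  induction l using mySplit.induct with
  | case1 => intro _; simp [mySplit]
  | case2 c rest hp ih =>
    rw [mySplit]; simp only [hp, if_pos]
    intro h
    have := mySplit_ne_nil (List.drop 6 rest)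
    cases hm : mySplit (List.drop 6 rest) with
    | nil => exact absurd hm this
    | cons a t => rw [hm] at h; simp at h
  | case3 c rest hp ih =>
    rw [mySplit]; simp only [hp, Bool.false_eq_true, if_false]
    cases hm : mySplit rest with
    | nil => exact absurd hm (mySplit_ne_nil _)
    | cons a t =>
      simp only [List.modifyHead]
      intro h
      simp at h
      have := ih (by rw [hm, h]; rfl)
      rw [hm, h] at this
      simp at this
      simp [this, h]

theorem scan_eq_numberJoin (n : Int) (l : List Char) :
    pvScan n l = numberJoin n (mySplit l) := by
  induction l using mySplit.induct generalizing n with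
  | case1 => simp [pvScan, mySplit, numberJoin]
  | case2 c rest hp ih =>
    rw [pvScan, mySplit]; simp only [hp, if_pos]
    cases hm : mySplit (List.drop 6 rest) with
    | nil => exact absurd hm (mySplit_ne_nil _)
    | cons a t => rw [ih, hm, numberJoin]; simp
  | case3 c rest hp ih =>
    rw [pvScan, mySplit]; simp only [hp, Bool.false_eq_true, if_false]
    cases hm : mySplit rest with
    | nil => exact absurd hm (mySplit_ne_nil _)
    | cons a t =>
      rw [ih, hm]
      cases t with
      | nil => simp [List.modifyHead, numberJoin]
      | cons b t' => simp [List.modifyHead, numberJoin]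

-- The loop of A, over the enumerated split pieces, computes the numbered rejoin.
theorem foldA (size : Int) : ∀ (xs : List (List Char)) (i : Int) (acc : String),
    xs ≠ [] → i + xs.length = size →
    (PySem.List.enumerate (xs.map String.ofList) i).foldl
      (fun new p =>
        if p.1 == size - 1 then new ++ p.2
        else new ++ p.2 ++ "{param" ++ PySem.Int.toStr (p.1 + 1) ++ "}") acc
    = acc ++ String.ofList (numberJoin (i + 1) xs) := by
  intro xs
  induction xs with
  | nil => intro i acc h; exact absurd rfl h
  | cons x t ih =>
    intro i acc _ hsz
    cases t with
    | nil =>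
      simp only [List.map, PySem.List.enumerate_cons, PySem.List.enumerate_nil,
        List.foldl_cons, List.foldl_nil, numberJoin]
      have : (i == size - 1) = true := by
        simp at hsz ⊢; omega
      rw [this]
      simp
    | cons y t' =>
      have hne : (i == size - 1) = false := by
        simp at hsz ⊢; omega
      rw [List.map_cons, PySem.List.enumerate_cons, List.foldl_cons]
      simp only [hne, Bool.false_eq_true, if_false]
      rw [ih (i + 1) _ (by simp) (by simp at hsz ⊢; omega)]
      rw [numberJoin]
      apply String.toList_inj.mp
      simp [String.toList_append, pvTag]

-- ===== VERDICT (by name: the statement is the Claim_ definition above) =====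
theorem sep_toList : "{param}".toList = pvSep := by decide

theorem add_number_param_spec : Claim_equal_add_number_param := by
  intro value _
  unfold Spec_add_number_param add_number_param add_number_param_alt
  rw [scan_eq_numberJoin]
  have hsplit : PySem.Str.split? value "{param}" =
      some ((mySplit value.toList).map String.ofList) := by
    rw [PySem.Str.split?, PySem.Chars.split?, sep_toList, splitOn_eq_mySplit]
    simp [pvSep]
  rw [hsplit]
  simp only [Option.getD_some, List.length_map]
  by_cases hgt : ((mySplit value.toList).length : Int) > 1
  · simp only [hgt, if_pos]
    rw [foldA _ _ _ _ (mySplit_ne_nil _) (by omega)]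
    simp
  · simp only [hgt, if_false]
    have h1 : (mySplit value.toList).length = 1 := by
      have := mySplit_ne_nil value.toList
      have : (mySplit value.toList).length ≠ 0 := by
        simpa [List.length_eq_zero_iff] using this
      omega
    rw [mySplit_singleton _ h1, numberJoin]
    exact String.ofList_toList.symm
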